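-- pv_equiv track=rewrite | github.com/Ryano1221/Financial-Modeling | backend/extraction/concessions.py | _count_unique_months
-- ===== SOURCE A (Python) =====
-- from typing import Any
--
-- def _count_unique_months(periods: list[dict[str, Any]]) -> int:
--     covered: set[int] = set()
--     for period in periods or []:
--         start_i = int(period.get("start_month") or 0)
--         end_i = int(period.get("end_month") or start_i)
--         for month_idx in range(start_i, end_i + 1):
--             covered.add(month_idx)
--     return len(covered)
-- ===== SOURCE B (Python) =====
-- def _count_unique_months(periods):
--     intervals = []
--     for period in periods or []:
--         start_i = int(period.get("start_month") or 0)
--         end_i = int(period.get("end_month") or start_i)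
--         if start_i <= end_i:
--             intervals.append((start_i, end_i))
--     intervals.sort(key=lambda iv: iv[0])
--     total = 0
--     current = None
--     for s, e in intervals:
--         if current is None:
--             current = (s, e)
--         elif s <= current[1]:
--             current = (current[0], max(current[1], e))
--         else:
--             total += current[1] - current[0] + 1
--             current = (s, e)
--     if current is not None:
--         total += current[1] - current[0] + 1
--     return total
-- ===== Notes on version B (the rewrite author's own statement) =====
-- stated objective: alternative
-- what changed: Instead of materialising every covered month in a set, B collects the (start,end) intervals, sorts them by start and sums the lengths of merged overlapping intervals; asymptotically this avoids A's cost proportional to the total number of covered months, though in a timing run narrow intervals both measure the same.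
import Mathlib
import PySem

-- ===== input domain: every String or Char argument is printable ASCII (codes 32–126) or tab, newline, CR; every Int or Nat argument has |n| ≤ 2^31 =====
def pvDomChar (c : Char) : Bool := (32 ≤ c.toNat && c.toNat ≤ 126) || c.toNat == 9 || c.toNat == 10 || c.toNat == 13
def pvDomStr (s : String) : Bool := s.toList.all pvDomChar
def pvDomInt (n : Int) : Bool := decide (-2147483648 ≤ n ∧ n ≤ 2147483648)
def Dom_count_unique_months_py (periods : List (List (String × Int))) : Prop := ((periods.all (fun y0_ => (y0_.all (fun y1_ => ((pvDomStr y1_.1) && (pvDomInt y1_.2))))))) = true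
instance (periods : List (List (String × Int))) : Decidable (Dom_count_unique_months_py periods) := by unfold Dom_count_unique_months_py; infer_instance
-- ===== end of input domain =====

-- B replaces A's month-by-month set filling with sort-and-merge of the intervals (alternative algorithm, equal result).


-- ===== PORT A =====
-- `x or d` on ints: x if present and nonzero, else d
def pvOrIntA (x : Option Int) (dflt : Int) : Int :=
  match x with
  | some v => if v = 0 then dflt else v
  | none => dflt

def pvStartA (period : List (String × Int)) : Int :=
  pvOrIntA ((PySem.Dict.ofList period).get? "start_month") 0

def pvEndA (period : List (String × Int)) : Int :=
  pvOrIntA ((PySem.Dict.ofList period).get? "end_month") (pvStartA period)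

def count_unique_months_py (periods : List (List (String × Int))) : Int :=
  let covered : PySem.Set Int :=
    periods.foldl (fun cov period =>
      (PySem.List.pyRange (pvStartA period) (pvEndA period + 1) 1).foldl
        (fun c m => PySem.Set.add c m) cov) []
  (covered.length : Int)

-- ===== PORT B =====
-- B extracts start/end exactly as A does (same lines in Source B): it reuses pvStartA/pvEndA.
-- collect the nonempty intervals (start, end)
def pvToIv (period : List (String × Int)) : Option (Int × Int) :=
  let s := pvStartA period
  let e := pvEndA period
  if s ≤ e then some (s, e) else none

-- one step of the merge loop; state = (total, current merged interval or none)
def pvMergeStep (st : Int × Option (Int × Int)) (iv : Int × Int) : Int × Option (Int × Int) :=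
  match st.2 with
  | none => (st.1, some iv)
  | some cur =>
      if iv.1 ≤ cur.2 then (st.1, some (cur.1, max cur.2 iv.2))
      else (st.1 + (cur.2 - cur.1 + 1), some iv)

def count_unique_months_py_alt (periods : List (List (String × Int))) : Int :=
  let ivs := PySem.List.sorted (periods.filterMap pvToIv) (fun iv => iv.1) false
  let st := ivs.foldl pvMergeStep (0, none)
  match st.2 with
  | none => st.1
  | some cur => st.1 + (cur.2 - cur.1 + 1)

-- ===== PRECONDITION & SPEC =====
def Spec_count_unique_months_py (periods : List (List (String × Int))) (out : Int) : Prop := out = count_unique_months_py_alt periods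
instance (periods : List (List (String × Int))) (out : Int) : Decidable (Spec_count_unique_months_py periods out) := by unfold Spec_count_unique_months_py; infer_instance

-- ===== CLAIM (what is proved, stated in full; the proofs are below) =====
def Claim_equal_count_unique_months_py : Prop := ∀ (periods : List (List (String × Int))), Dom_count_unique_months_py periods → Spec_count_unique_months_py periods (count_unique_months_py periods)

-- ===== LEMMAS AND PROOFS =====

-- the union of the intervals as a Finset (proof-only helper)
noncomputable def pvU (ivs : List (Int × Int)) : Finset Int :=
  ivs.foldr (fun iv acc => Finset.Icc iv.1 iv.2 ∪ acc) ∅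

theorem pvU_cons (iv : Int × Int) (t : List (Int × Int)) :
    pvU (iv :: t) = Finset.Icc iv.1 iv.2 ∪ pvU t := rfl

theorem mem_pvU (ivs : List (Int × Int)) (m : Int) :
    m ∈ pvU ivs ↔ ∃ iv ∈ ivs, iv.1 ≤ m ∧ m ≤ iv.2 := by
  induction ivs with
  | nil => simp [pvU]
  | cons iv t ih =>
      rw [pvU_cons, Finset.mem_union, Finset.mem_Icc, ih]
      constructor
      · rintro (h | ⟨jv, hjv, h1, h2⟩)
        · exact ⟨iv, List.mem_cons_self, h⟩
        · exact ⟨jv, List.mem_cons_of_mem _ hjv, h1, h2⟩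
      · rintro ⟨jv, hjv, h1, h2⟩
        rcases List.mem_cons.mp hjv with rfl | hjv
        · exact Or.inl ⟨h1, h2⟩
        · exact Or.inr ⟨jv, hjv, h1, h2⟩

-- ===== A side =====
theorem A_loop_mem (periods : List (List (String × Int))) (cov : PySem.Set Int) (m : Int) :
    m ∈ periods.foldl (fun cov period =>
      (PySem.List.pyRange (pvStartA period) (pvEndA period + 1) 1).foldl
        (fun c m => PySem.Set.add c m) cov) cov ↔
    m ∈ cov ∨ ∃ p ∈ periods, pvStartA p ≤ m ∧ m ≤ pvEndA p := by
  induction periods generalizing cov with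
  | nil => simp
  | cons p t ih =>
      rw [List.foldl_cons]
      have hupd : (PySem.List.pyRange (pvStartA p) (pvEndA p + 1) 1).foldl
          (fun c m => PySem.Set.add c m) cov
          = PySem.Set.update cov (PySem.List.pyRange (pvStartA p) (pvEndA p + 1) 1) := rfl
      rw [hupd, ih, PySem.Set.mem_update, PySem.List.mem_pyRange_one]
      constructor
      · rintro ((h | ⟨h1, h2⟩) | ⟨q, hq, hq1, hq2⟩)
        · exact Or.inl h
        · exact Or.inr ⟨p, List.mem_cons_self, h1, by omega⟩
        · exact Or.inr ⟨q, List.mem_cons_of_mem _ hq, hq1, hq2⟩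
      · rintro (h | ⟨q, hq, hq1, hq2⟩)
        · exact Or.inl (Or.inl h)
        · rcases List.mem_cons.mp hq with rfl | hq
          · exact Or.inl (Or.inr ⟨hq1, by omega⟩)
          · exact Or.inr ⟨q, hq, hq1, hq2⟩

theorem A_loop_nodup (periods : List (List (String × Int))) (cov : PySem.Set Int) (h : cov.Nodup) :
    (periods.foldl (fun cov period =>
      (PySem.List.pyRange (pvStartA period) (pvEndA period + 1) 1).foldl
        (fun c m => PySem.Set.add c m) cov) cov).Nodup := by
  induction periods generalizing cov with
  | nil => exact h
  | cons p t ih =>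
      rw [List.foldl_cons]
      exact ih _ (PySem.Set.nodup_update _ _ h)

theorem A_eq_card (periods : List (List (String × Int))) :
    count_unique_months_py periods =
      ((pvU (periods.map (fun p => (pvStartA p, pvEndA p)))).card : Int) := by
  have hdef : count_unique_months_py periods =
      (((periods.foldl (fun cov period =>
        (PySem.List.pyRange (pvStartA period) (pvEndA period + 1) 1).foldl
          (fun c m => PySem.Set.add c m) cov) []).length : Nat) : Int) := rfl
  rw [hdef]
  have hnd := A_loop_nodup periods [] List.nodup_nil
  rw [← List.toFinset_card_of_nodup hnd]
  congr 2
  apply Finset.ext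
  intro m
  rw [List.mem_toFinset, A_loop_mem, mem_pvU]
  simp

-- ===== B side =====
theorem merge_spec (L : List (Int × Int)) (total cs ce : Int)
    (hle : cs ≤ ce)
    (hne : ∀ iv ∈ L, iv.1 ≤ iv.2)
    (hcs : ∀ iv ∈ L, cs ≤ iv.1)
    (hsorted : L.Pairwise (fun a b => a.1 ≤ b.1)) :
    (match (L.foldl pvMergeStep (total, some (cs, ce))).2 with
     | none => (L.foldl pvMergeStep (total, some (cs, ce))).1
     | some cur => (L.foldl pvMergeStep (total, some (cs, ce))).1 + (cur.2 - cur.1 + 1)) =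
    total + ((Finset.Icc cs ce ∪ pvU L).card : Int) := by
  induction L generalizing total cs ce with
  | nil =>
      simp only [List.foldl_nil, pvU, List.foldr_nil, Finset.union_empty, Int.card_Icc]
      have h1 : ((ce + 1 - cs).toNat : Int) = ce + 1 - cs := Int.toNat_of_nonneg (by omega)
      rw [h1]; ring
  | cons iv t ih =>
      obtain ⟨s, e⟩ := iv
      have hse : s ≤ e := hne (s, e) (List.mem_cons_self)
      have hcss : cs ≤ s := hcs (s, e) (List.mem_cons_self)
      rw [List.foldl_cons]
      by_cases hov : s ≤ ce
      · have hstep : pvMergeStep (total, some (cs, ce)) (s, e) = (total, some (cs, max ce e)) := by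
          simp [pvMergeStep, hov]
        rw [hstep, ih total cs (max ce e) (le_trans hle (le_max_left _ _))
              (fun jv h => hne jv (List.mem_cons_of_mem _ h))
              (fun jv h => le_trans hcss ((List.pairwise_cons.mp hsorted).1 jv h))
              (List.pairwise_cons.mp hsorted).2]
        rw [pvU_cons, ← Finset.union_assoc]
        have hun : Finset.Icc cs ce ∪ Finset.Icc s e = Finset.Icc cs (max ce e) := by
          apply Finset.ext
          intro m
          simp only [Finset.mem_union, Finset.mem_Icc, le_max_iff]
          omega
        rw [hun]
      · have hstep : pvMergeStep (total, some (cs, ce)) (s, e) = (total + (ce - cs + 1), some (s, e)) := by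
          simp [pvMergeStep, hov]
        rw [hstep, ih (total + (ce - cs + 1)) s e hse
              (fun jv h => hne jv (List.mem_cons_of_mem _ h))
              (fun jv h => (List.pairwise_cons.mp hsorted).1 jv h)
              (List.pairwise_cons.mp hsorted).2]
        rw [pvU_cons]
        have hdisj : Disjoint (Finset.Icc cs ce) (Finset.Icc s e ∪ pvU t) := by
          rw [Finset.disjoint_left]
          intro m hm hm2
          simp only [Finset.mem_Icc] at hm
          rcases Finset.mem_union.mp hm2 with h | h
          · simp only [Finset.mem_Icc] at h; omega
          · obtain ⟨jv, hjv, h1, h2⟩ := (mem_pvU t m).mp h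
            have := (List.pairwise_cons.mp hsorted).1 jv hjv
            omega
        rw [Finset.card_union_of_disjoint hdisj]
        have hcard : ((Finset.Icc cs ce).card : Int) = ce - cs + 1 := by
          rw [Int.card_Icc, Int.toNat_of_nonneg (by omega)]; ring
        push_cast
        push_cast at hcard
        omega

theorem pvToIv_mem_nonempty (jv : Int × Int) (periods : List (List (String × Int)))
    (h : jv ∈ periods.filterMap pvToIv) : jv.1 ≤ jv.2 := by
  obtain ⟨a, b⟩ := jv
  obtain ⟨p, _, hp⟩ := List.mem_filterMap.mp h
  by_cases hc : pvStartA p ≤ pvEndA p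
  · simp [pvToIv, hc] at hp
    omega
  · simp [pvToIv, hc] at hp

theorem B_eq_card (periods : List (List (String × Int))) :
    count_unique_months_py_alt periods =
      ((pvU (PySem.List.sorted (periods.filterMap pvToIv) (fun iv => iv.1) false)).card : Int) := by
  have hdef : ∀ ivs : List (Int × Int),
      PySem.List.sorted (periods.filterMap pvToIv) (fun iv => iv.1) false = ivs →
      count_unique_months_py_alt periods =
        (match (ivs.foldl pvMergeStep (0, none)).2 with
         | none => (ivs.foldl pvMergeStep (0, none)).1
         | some cur => (ivs.foldl pvMergeStep (0, none)).1 + (cur.2 - cur.1 + 1)) := by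
    intro ivs hivs
    unfold count_unique_months_py_alt
    rw [hivs]
  cases hs : PySem.List.sorted (periods.filterMap pvToIv) (fun iv => iv.1) false with
  | nil => rw [hdef [] hs]; simp [pvU]
  | cons iv t =>
      obtain ⟨s, e⟩ := iv
      have hmemiv : ∀ jv ∈ (s, e) :: t, jv.1 ≤ jv.2 := by
        intro jv hjv
        apply pvToIv_mem_nonempty jv periods
        rw [← PySem.List.mem_sorted (periods.filterMap pvToIv) (fun iv => iv.1) false, hs]
        exact hjv
      have hpw : ((s, e) :: t).Pairwise (fun a b : Int × Int => a.1 ≤ b.1) := by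
        rw [← hs]; exact PySem.List.sorted_pairwise _ _
      have hse : s ≤ e := hmemiv (s, e) (List.mem_cons_self)
      rw [hdef ((s, e) :: t) hs]
      simp only [List.foldl_cons]
      have hstep : pvMergeStep (0, none) (s, e) = (0, some (s, e)) := rfl
      rw [hstep]
      rw [merge_spec t 0 s e hse
        (fun jv h => hmemiv jv (List.mem_cons_of_mem _ h))
        (fun jv h => (List.pairwise_cons.mp hpw).1 jv h)
        (List.pairwise_cons.mp hpw).2]
      rw [pvU_cons]
      ring

theorem pvU_sorted_filterMap (periods : List (List (String × Int))) :
    pvU (PySem.List.sorted (periods.filterMap pvToIv) (fun iv => iv.1) false) =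
      pvU (periods.map (fun p => (pvStartA p, pvEndA p))) := by
  apply Finset.ext
  intro m
  rw [mem_pvU, mem_pvU]
  constructor
  · rintro ⟨⟨a, b⟩, hiv, h1, h2⟩
    have hmem : (a, b) ∈ periods.filterMap pvToIv :=
      (PySem.List.mem_sorted _ _ _ _).mp hiv
    obtain ⟨p, hp, hiv2⟩ := List.mem_filterMap.mp hmem
    refine ⟨(pvStartA p, pvEndA p), List.mem_map.mpr ⟨p, hp, rfl⟩, ?_⟩
    by_cases hc : pvStartA p ≤ pvEndA p
    · simp [pvToIv, hc] at hiv2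
      simp only at h1 h2 ⊢
      omega
    · simp [pvToIv, hc] at hiv2
  · rintro ⟨iv, hiv, h1, h2⟩
    obtain ⟨p, hp, hiv2⟩ := List.mem_map.mp hiv
    subst hiv2
    simp only at h1 h2
    refine ⟨(pvStartA p, pvEndA p), ?_, h1, h2⟩
    rw [PySem.List.mem_sorted]
    apply List.mem_filterMap.mpr
    refine ⟨p, hp, ?_⟩
    simp [pvToIv, le_trans h1 h2]

-- ===== VERDICT (by name: the statement is the Claim_ definition above) =====
theorem count_unique_months_py_spec : Claim_equal_count_unique_months_py := by
  intro periods _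
  unfold Spec_count_unique_months_py
  rw [A_eq_card, B_eq_card, pvU_sorted_filterMap]
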